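-- pv_equiv track=rewrite | github.com/Telecominfraproject/ols-ucentral-client | tests/tools/extract-schema-properties.py | exclude_containers
-- ===== SOURCE A (Python) =====
-- from typing import Set, Dict, Any
--
-- def exclude_containers(properties: Set[str]) -> Set[str]:
--     """
--     Remove container properties (keep only leaves).
--
--     For example, if we have both:
--         - interfaces[].ipv4
--         - interfaces[].ipv4.subnet
--
--     We only keep interfaces[].ipv4.subnet (the leaf).
--     """
--     leaf_properties = set()
--
--     for prop in properties:
--         # Check if this property is a prefix of any other property
--         is_container = any(
--             other != prop and other.startswith(prop + ".")
--             for other in properties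
--         )
--
--         if not is_container:
--             leaf_properties.add(prop)
--
--     return leaf_properties
-- ===== SOURCE B (Python) =====
-- def exclude_containers(properties):
--     # Collect every dotted ancestor prefix that occurs in some property,
--     # then keep exactly the properties that are not such a prefix.
--     prefixes = set()
--     for prop in properties:
--         for i, ch in enumerate(prop):
--             if ch == ".":
--                 prefixes.add(prop[:i])
--     return {p for p in properties if p not in prefixes}
-- ===== Notes on version B (the rewrite author's own statement) =====
-- stated objective: faster
-- what changed: Instead of testing each property against every other property with startswith (quadratic in the number of properties), B makes one pass collecting all dotted ancestor prefixes into a set and keeps the properties not in that set.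
import Mathlib
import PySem

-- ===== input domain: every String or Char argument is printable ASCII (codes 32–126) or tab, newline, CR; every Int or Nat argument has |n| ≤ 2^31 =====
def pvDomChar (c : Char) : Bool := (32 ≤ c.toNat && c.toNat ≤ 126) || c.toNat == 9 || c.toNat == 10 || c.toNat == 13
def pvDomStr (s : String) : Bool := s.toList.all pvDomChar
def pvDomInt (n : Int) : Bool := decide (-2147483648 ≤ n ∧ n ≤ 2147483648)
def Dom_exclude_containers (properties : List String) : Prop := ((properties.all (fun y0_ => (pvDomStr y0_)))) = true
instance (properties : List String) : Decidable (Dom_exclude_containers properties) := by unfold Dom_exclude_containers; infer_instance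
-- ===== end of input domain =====

-- B replaces A's quadratic all-pairs startswith scan by one pass that collects all dotted
-- ancestor prefixes into a set and keeps the properties not in that set (asymptotically faster).


-- ===== PORT A =====
def exclude_containers (properties : List String) : List String :=
  properties.foldl
    (fun leaf_properties prop =>
      let is_container := properties.any (fun other =>
        (other != prop) && PySem.Str.startswith other (prop ++ "."))
      if !is_container then PySem.Set.add leaf_properties prop else leaf_properties)
    PySem.Set.empty

-- ===== PORT B =====
def exclude_containers_alt (properties : List String) : List String :=
  let prefixes : PySem.Set String := properties.foldl
    (fun prefixes prop =>
      (PySem.List.enumerate prop.toList).foldl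
        (fun prefixes p =>
          if p.2 == '.' then PySem.Set.add prefixes (PySem.Str.slice prop none (some p.1))
          else prefixes)
        prefixes)
    PySem.Set.empty
  PySem.Set.ofList (properties.filter (fun p => !(PySem.Set.contains prefixes p)))

-- ===== PRECONDITION & SPEC =====
-- The parameter is a Python set, so its list model holds distinct elements.
def Pre_exclude_containers (properties : List String) : Prop := properties.Nodup
instance (properties : List String) : Decidable (Pre_exclude_containers properties) := by unfold Pre_exclude_containers; infer_instance
def pvWitness_exclude_containers : List String := ["interfaces[].ipv4", "interfaces[].ipv4.subnet", "x"]

def Spec_exclude_containers (properties : List String) (out : List String) : Prop := out = exclude_containers_alt properties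
instance (properties : List String) (out : List String) : Decidable (Spec_exclude_containers properties out) := by unfold Spec_exclude_containers; infer_instance

-- ===== CLAIM (what is proved, stated in full; the proofs are below) =====
def Claim_equal_exclude_containers : Prop := ∀ (properties : List String), Dom_exclude_containers properties → Pre_exclude_containers properties → Spec_exclude_containers properties (exclude_containers properties)

-- ===== LEMMAS AND PROOFS =====

-- a char list u is emitted as a prefix of L exactly when u ++ ['.'] is a prefix of L
theorem pv_dot_prefix_iff (u L : List Char) :
    (∃ k, ∃ _ : k < L.length, L[k] = '.' ∧ u = L.take k) ↔ u ++ ['.'] <+: L := by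
  constructor
  · rintro ⟨k, hk, hdot, rfl⟩
    refine ⟨L.drop (k+1), ?_⟩
    have h1 : L.drop k = L[k] :: L.drop (k+1) := List.drop_eq_getElem_cons hk
    calc L.take k ++ ['.'] ++ L.drop (k+1)
        = L.take k ++ (L[k] :: L.drop (k+1)) := by rw [hdot]; simp
      _ = L.take k ++ L.drop k := by rw [h1]
      _ = L := List.take_append_drop k L
  · rintro ⟨t, ht⟩
    obtain rfl : L = u ++ '.' :: t := by rw [← ht]; simp
    have hk : u.length < (u ++ '.' :: t).length := by simp
    refine ⟨u.length, hk, ?_, ?_⟩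
    · rw [List.getElem_append_right (by omega)]
      simp
    · simp

-- membership in a fold of conditional Set.add over any list
theorem pv_mem_foldl_cond_add {α β : Type} [BEq α] [LawfulBEq α]
    (c : β → Bool) (f : β → α) (l : List β) (acc : PySem.Set α) (y : α) :
    y ∈ l.foldl (fun a p => if c p then PySem.Set.add a (f p) else a) acc ↔
      y ∈ acc ∨ ∃ p ∈ l, c p ∧ y = f p := by
  induction l generalizing acc with
  | nil => simp
  | cons x xs ih =>
    simp only [List.foldl_cons]
    rw [ih]
    by_cases hc : c x
    · simp [hc, PySem.Set.mem_add]
      try tauto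
    · simp [hc]
      try tauto

-- the prefixes set of B contains x iff x ++ "." is a prefix of some property
theorem pv_mem_prefixes (properties : List String) (x : String) :
    (x ∈ properties.foldl
      (fun prefixes prop =>
        (PySem.List.enumerate prop.toList).foldl
          (fun prefixes p =>
            if p.2 == '.' then PySem.Set.add prefixes (PySem.Str.slice prop none (some p.1))
            else prefixes)
          prefixes)
      PySem.Set.empty) ↔
    ∃ s ∈ properties, x.toList ++ ['.'] <+: s.toList := by
  have inner : ∀ (prop : String) (acc : PySem.Set String),
      (x ∈ (PySem.List.enumerate prop.toList).foldl
        (fun prefixes p =>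
          if p.2 == '.' then PySem.Set.add prefixes (PySem.Str.slice prop none (some p.1))
          else prefixes) acc) ↔ x ∈ acc ∨ x.toList ++ ['.'] <+: prop.toList := by
    intro prop acc
    rw [pv_mem_foldl_cond_add]
    rw [← pv_dot_prefix_iff]
    constructor
    · rintro (h | ⟨p, hp, hc, rfl⟩)
      · exact Or.inl h
      · right
        rw [PySem.List.mem_enumerate_iff] at hp
        obtain ⟨k, hk, rfl⟩ := hp
        refine ⟨k, hk, by simpa using hc, ?_⟩
        simp [PySem.Str.toList_slice, PySem.List.slice_to_natCast]
    · rintro (h | ⟨k, hk, hdot, hx⟩)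
      · exact Or.inl h
      · right
        refine ⟨((0:Int) + (k:Nat), prop.toList[k]), ?_, by simpa using hdot, ?_⟩
        · rw [PySem.List.mem_enumerate_iff]; exact ⟨k, hk, rfl⟩
        · have hts : (PySem.Str.slice prop none (some ((0:Int)+(k:Nat)))).toList
              = prop.toList.take k := by
            simp [PySem.Str.toList_slice, PySem.List.slice_to_natCast]
          exact String.toList_inj.mp (by rw [hts, hx])
  have outer : ∀ (l : List String) (acc : PySem.Set String),
      (x ∈ l.foldl (fun prefixes prop =>
        (PySem.List.enumerate prop.toList).foldl
          (fun prefixes p =>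
            if p.2 == '.' then PySem.Set.add prefixes (PySem.Str.slice prop none (some p.1))
            else prefixes) prefixes) acc) ↔
      x ∈ acc ∨ ∃ s ∈ l, x.toList ++ ['.'] <+: s.toList := by
    intro l
    induction l with
    | nil => simp
    | cons a as iha =>
      intro acc
      simp only [List.foldl_cons]
      rw [iha, inner]
      simp only [List.exists_mem_cons_iff]
      tauto
  rw [outer]
  simp [PySem.Set.empty]

-- A's container test for x equals "x ++ '.' is a prefix of some property"
theorem pv_anyA_iff (properties : List String) (x : String) :
    (properties.any (fun other => (other != x) && PySem.Str.startswith other (x ++ "."))) = true ↔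
      ∃ s ∈ properties, x.toList ++ ['.'] <+: s.toList := by
  rw [List.any_eq_true]
  constructor
  · rintro ⟨other, hmem, h⟩
    simp only [Bool.and_eq_true] at h
    refine ⟨other, hmem, ?_⟩
    have := h.2
    rw [PySem.Str.startswith_eq, PySem.Chars.startswith_iff] at this
    simpa using this
  · rintro ⟨other, hmem, h⟩
    refine ⟨other, hmem, ?_⟩
    have hlen : x.toList.length < other.toList.length := by
      have := h.length_le
      simp only [List.length_append, List.length_cons, List.length_nil] at this
      omega
    have hne : (other != x) = true := by
      simp only [bne_iff_ne, ne_eq]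
      intro hEq; subst hEq; omega
    have hsw : PySem.Str.startswith other (x ++ ".") = true := by
      rw [PySem.Str.startswith_eq, PySem.Chars.startswith_iff]
      simpa using h
    rw [hne, hsw]
    rfl

-- fold of conditional Set.add over a Nodup list disjoint from acc is acc ++ filter
theorem pv_foldl_add_eq_filter {α : Type} [BEq α] [LawfulBEq α]
    (p : α → Bool) (xs : List α) (acc : List α)
    (hnd : xs.Nodup) (hdis : ∀ x ∈ xs, x ∉ acc) :
    xs.foldl (fun a x => if p x then PySem.Set.add a x else a) acc = acc ++ xs.filter p := by
  induction xs generalizing acc with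
  | nil => simp
  | cons x xs ih =>
    simp only [List.foldl_cons, List.filter_cons]
    have hx : x ∉ acc := hdis x (List.mem_cons_self ..)
    have hnd' := (List.nodup_cons.mp hnd).2
    have hxnotin := (List.nodup_cons.mp hnd).1
    by_cases hp : p x
    · rw [if_pos hp, if_pos hp, PySem.Set.add_of_not_mem hx,
          ih (acc ++ [x]) hnd' ?_]
      · simp
      · intro y hy
        simp only [List.mem_append, List.mem_singleton]
        rintro (h | rfl)
        · exact hdis y (List.mem_cons_of_mem _ hy) h
        · exact hxnotin hy
    · rw [if_neg hp, if_neg hp, ih acc hnd' (fun y hy => hdis y (List.mem_cons_of_mem _ hy))]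

-- ===== VERDICT (by name: the statement is the Claim_ definition above) =====
theorem exclude_containers_spec : Claim_equal_exclude_containers := by
  intro properties _ hpre
  unfold Spec_exclude_containers exclude_containers
  have hB : exclude_containers_alt properties
      = PySem.Set.ofList (properties.filter (fun p => !(PySem.Set.contains
          (properties.foldl
            (fun prefixes prop =>
              (PySem.List.enumerate prop.toList).foldl
                (fun prefixes p =>
                  if p.2 == '.' then PySem.Set.add prefixes (PySem.Str.slice prop none (some p.1))
                  else prefixes) prefixes)
            PySem.Set.empty) p))) := rfl
  rw [hB]
  have hA : properties.foldl
      (fun leaf_properties prop =>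
        let is_container := properties.any (fun other =>
          (other != prop) && PySem.Str.startswith other (prop ++ "."))
        if !is_container then PySem.Set.add leaf_properties prop else leaf_properties)
      PySem.Set.empty
    = properties.filter (fun prop =>
        !(properties.any (fun other => (other != prop) && PySem.Str.startswith other (prop ++ ".")))) := by
    have := pv_foldl_add_eq_filter
      (fun prop => !(properties.any (fun other => (other != prop) && PySem.Str.startswith other (prop ++ "."))))
      properties [] hpre (by simp)
    simpa using this
  rw [hA]
  rw [PySem.Set.ofList_eq_self_of_nodup _ (List.Nodup.filter _ hpre)]
  apply List.filter_congr
  intro x hx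
  have h1 := pv_anyA_iff properties x
  have h2 := pv_mem_prefixes properties x
  by_cases hc : ∃ s ∈ properties, x.toList ++ ['.'] <+: s.toList
  · have : (properties.any fun other => (other != x) && PySem.Str.startswith other (x ++ ".")) = true := h1.mpr hc
    rw [this]
    have : PySem.Set.contains _ x = true := (PySem.Set.contains_iff _ _).mpr (h2.mpr hc)
    rw [this]
  · have e1 : (properties.any fun other => (other != x) && PySem.Str.startswith other (x ++ ".")) = false := by
      by_contra h
      exact hc (h1.mp (by simpa using h))
    rw [e1]
    have e2 : PySem.Set.contains (properties.foldl
        (fun prefixes prop =>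
          (PySem.List.enumerate prop.toList).foldl
            (fun prefixes p =>
              if p.2 == '.' then PySem.Set.add prefixes (PySem.Str.slice prop none (some p.1))
              else prefixes) prefixes) PySem.Set.empty) x = false := by
      by_contra h
      exact hc (h2.mp ((PySem.Set.contains_iff _ _).mp (by simpa using h)))
    rw [e2]
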